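-- pv_equiv track=rewrite | github.com/matiw01/mgr | src/research_first_step/analyze_results.py | find_manipulation_key
-- ===== SOURCE A (Python) =====
-- from typing import Any, Dict, List, Optional, Tuple
--
-- MANIP_KEYS = {"manipulacja", "manipulation"}
--
-- def find_manipulation_key(per_class: Dict[str, Any]) -> Optional[str]:
--     for k in per_class:
--         if k.lower().strip() in MANIP_KEYS:
--             return k
--     for k in per_class:
--         if "manip" in k.lower():
--             return k
--     return None
-- ===== SOURCE B (Python) =====
-- MANIP_KEYS = {"manipulacja", "manipulation"}
--
-- def find_manipulation_key(per_class):
--     candidate = None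
--     for k in per_class:
--         kl = k.lower()
--         if kl.strip() in MANIP_KEYS:
--             return k
--         if candidate is None and "manip" in kl:
--             candidate = k
--     return candidate
-- ===== Notes on version B (the rewrite author's own statement) =====
-- stated objective: simpler
-- what changed: Replaces A's two separate full scans (exact-match pass, then substring pass) by a single traversal that returns on an exact match and maintains one Optional fallback candidate for the first substring match.
import Mathlib
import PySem

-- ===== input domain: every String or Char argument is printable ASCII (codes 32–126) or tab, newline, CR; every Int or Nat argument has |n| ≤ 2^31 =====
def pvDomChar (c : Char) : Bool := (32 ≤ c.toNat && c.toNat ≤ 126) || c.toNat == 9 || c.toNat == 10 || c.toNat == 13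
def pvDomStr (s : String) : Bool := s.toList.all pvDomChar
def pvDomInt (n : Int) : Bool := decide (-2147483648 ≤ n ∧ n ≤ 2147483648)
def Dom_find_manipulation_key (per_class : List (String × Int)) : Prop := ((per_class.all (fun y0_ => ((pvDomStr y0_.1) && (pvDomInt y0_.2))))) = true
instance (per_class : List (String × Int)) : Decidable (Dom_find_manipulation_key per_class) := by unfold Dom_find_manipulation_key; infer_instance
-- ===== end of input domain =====

-- B changes: one pass with a maintained fallback candidate instead of A's two full scans (objective: simpler).

-- ===== PORT A =====
def pvManipKeys : PySem.Set String := PySem.Set.ofList ["manipulacja", "manipulation"]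

-- first loop of A: return k whose lowered+stripped form is in MANIP_KEYS
def pvALoop1 : List (String × Int) → Option String
  | [] => none
  | (k, _) :: rest =>
    if pvManipKeys.contains (PySem.Str.strip (PySem.Str.lower k)) then some k else pvALoop1 rest

-- second loop of A: return k whose lowered form contains "manip"
def pvALoop2 : List (String × Int) → Option String
  | [] => none
  | (k, _) :: rest =>
    if PySem.Str.isIn "manip" (PySem.Str.lower k) then some k else pvALoop2 rest

def find_manipulation_key (per_class : List (String × Int)) : Option String :=
  match pvALoop1 per_class with
  | some k => some k
  | none =>
    match pvALoop2 per_class with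
    | some k => some k
    | none => none

-- ===== PORT B =====
-- single pass: early return on exact match, keep the first substring match as candidate
def pvBLoop : List (String × Int) → Option String → Option String
  | [], cand => cand
  | (k, _) :: rest, cand =>
    let kl := PySem.Str.lower k
    if pvManipKeys.contains (PySem.Str.strip kl) then some k
    else pvBLoop rest (if cand.isNone && PySem.Str.isIn "manip" kl then some k else cand)

def find_manipulation_key_alt (per_class : List (String × Int)) : Option String :=
  pvBLoop per_class none

-- ===== PRECONDITION & SPEC =====
def Spec_find_manipulation_key (per_class : List (String × Int)) (out : Option String) : Prop := out = find_manipulation_key_alt per_class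
instance (per_class : List (String × Int)) (out : Option String) : Decidable (Spec_find_manipulation_key per_class out) := by unfold Spec_find_manipulation_key; infer_instance

-- ===== CLAIM (what is proved, stated in full; the proofs are below) =====
def Claim_equal_find_manipulation_key : Prop := ∀ (per_class : List (String × Int)), Dom_find_manipulation_key per_class → Spec_find_manipulation_key per_class (find_manipulation_key per_class)

-- ===== LEMMAS AND PROOFS =====

-- loop invariant: B's single pass equals "exact match, else candidate, else substring match"
theorem pvBLoop_eq (l : List (String × Int)) (cand : Option String) :
    pvBLoop l cand = (pvALoop1 l).or (cand.or (pvALoop2 l)) := by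
  induction l generalizing cand with
  | nil => cases cand <;> rfl
  | cons p rest ih =>
    obtain ⟨k, v⟩ := p
    simp only [pvBLoop, pvALoop1, pvALoop2, ih]
    cases cand <;> simp only [Option.isNone] <;> split_ifs with h1 h2 <;> simp_all

-- ===== VERDICT (by name: the statement is the Claim_ definition above) =====
theorem find_manipulation_key_spec : Claim_equal_find_manipulation_key := by
  intro l _
  unfold Spec_find_manipulation_key find_manipulation_key find_manipulation_key_alt
  rw [pvBLoop_eq]
  cases h1 : pvALoop1 l <;> cases h2 : pvALoop2 l <;> simp [Option.or]
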